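-- pv_equiv track=rewrite | github.com/norman2112/portfoliosMCP | portfolios-apis/okrs-api-main/okrs_api/model_helpers/work_item_containers.py | _reindexed_objective_editing_levels
-- ===== SOURCE A (Python) =====
-- def _reindexed_objective_editing_levels(depths, deleted_level_depth):
--     """
--     Reindex and return the depths based on the deleted_level_depth.
--
--     Accommodate for duplicate values. Return the new, deprecated depths.
--     """
--     new_depths = set()
--     for depth in depths:
--         if depth > deleted_level_depth:
--             depth = depth - 1
--         new_depths.add(depth)
--
--     new_depths = list(new_depths)
--     new_depths.sort()
--     return new_depths
-- ===== SOURCE B (Python) =====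
-- def _reindexed_objective_editing_levels(depths, deleted_level_depth):
--     """Maintain a sorted, duplicate-free result incrementally: for each
--     transformed depth, scan to its position and insert it unless present.
--     No set and no final sort are used."""
--     result = []
--     for depth in depths:
--         t = depth - 1 if depth > deleted_level_depth else depth
--         i = 0
--         while i < len(result) and result[i] < t:
--             i += 1
--         if i == len(result) or result[i] != t:
--             result.insert(i, t)
--     return result
-- ===== Notes on version B (the rewrite author's own statement) =====
-- stated objective: alternative
-- what changed: B replaces A's hash-set accumulation plus final sort with an incremental insertion-sort-with-dedup: it keeps the result sorted and duplicate-free at every step by inserting each transformed depth at its scanned position, so no set and no sort call exist.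
import Mathlib
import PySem

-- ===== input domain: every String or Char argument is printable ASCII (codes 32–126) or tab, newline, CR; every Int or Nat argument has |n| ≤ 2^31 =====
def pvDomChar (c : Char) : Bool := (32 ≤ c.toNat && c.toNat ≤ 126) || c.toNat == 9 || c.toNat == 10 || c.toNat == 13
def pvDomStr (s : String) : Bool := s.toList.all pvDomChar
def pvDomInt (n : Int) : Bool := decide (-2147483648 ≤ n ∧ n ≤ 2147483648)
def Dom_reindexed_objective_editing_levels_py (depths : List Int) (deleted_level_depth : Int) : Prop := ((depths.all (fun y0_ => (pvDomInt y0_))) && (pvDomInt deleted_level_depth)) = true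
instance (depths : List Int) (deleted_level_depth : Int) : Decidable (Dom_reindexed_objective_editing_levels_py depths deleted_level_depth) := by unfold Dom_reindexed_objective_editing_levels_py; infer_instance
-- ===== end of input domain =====

-- B replaces A's set-accumulation-then-sort by an incremental insertion-sort-with-dedup
-- (the result is kept sorted and duplicate-free after every element; no set, no sort call).

-- ===== PORT A =====
def reindexed_objective_editing_levels_py (depths : List Int) (deleted_level_depth : Int) : List Int :=
  -- new_depths = set(); for depth in depths: …; new_depths.add(depth)
  let new_depths : PySem.Set Int :=
    depths.foldl (fun s depth =>
      PySem.Set.add s (if depth > deleted_level_depth then depth - 1 else depth)) PySem.Set.empty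
  -- new_depths = list(new_depths); new_depths.sort()
  PySem.List.sorted new_depths (fun x => x) false

-- ===== PORT B =====
-- the scan-to-position-and-insert-unless-present step (Source B's while loop + conditional insert)
def pvInsertUnique (t : Int) : List Int → List Int
  | [] => [t]                                   -- i == len(result): append
  | y :: ys =>
      if y < t then y :: pvInsertUnique t ys    -- result[i] < t: keep scanning
      else if y = t then y :: ys                -- already present: no insert
      else t :: y :: ys                         -- insert t at position i

def reindexed_objective_editing_levels_py_alt (depths : List Int) (deleted_level_depth : Int) : List Int :=
  depths.foldl (fun result depth =>
    pvInsertUnique (if depth > deleted_level_depth then depth - 1 else depth) result) []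

-- ===== PRECONDITION & SPEC =====
def Spec_reindexed_objective_editing_levels_py (depths : List Int) (deleted_level_depth : Int) (out : List Int) : Prop := out = reindexed_objective_editing_levels_py_alt depths deleted_level_depth
instance (depths : List Int) (deleted_level_depth : Int) (out : List Int) : Decidable (Spec_reindexed_objective_editing_levels_py depths deleted_level_depth out) := by unfold Spec_reindexed_objective_editing_levels_py; infer_instance

-- ===== CLAIM =====
def Claim_equal_reindexed_objective_editing_levels_py : Prop := ∀ (depths : List Int) (deleted_level_depth : Int), Dom_reindexed_objective_editing_levels_py depths deleted_level_depth → Spec_reindexed_objective_editing_levels_py depths deleted_level_depth (reindexed_objective_editing_levels_py depths deleted_level_depth)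

-- ===== LEMMAS AND PROOFS =====

-- A's foldl over depths adding f(depth) is set(map f depths)
theorem pvFoldl_add_eq_ofList (depths : List Int) (f : Int → Int) :
    depths.foldl (fun s d => PySem.Set.add s (f d)) PySem.Set.empty
      = PySem.Set.ofList (depths.map f) := by
  rw [PySem.Set.ofList_eq_foldl, List.foldl_map]
  rfl

theorem pvInsertUnique_mem (t x : Int) (l : List Int) :
    x ∈ pvInsertUnique t l ↔ x = t ∨ x ∈ l := by
  induction l with
  | nil => simp [pvInsertUnique]
  | cons y ys ih =>
    simp only [pvInsertUnique]
    split_ifs with h1 h2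
    · simp only [List.mem_cons, ih]; tauto
    · subst h2; simp only [List.mem_cons]; tauto
    · simp only [List.mem_cons]

theorem pvInsertUnique_pairwise (t : Int) (l : List Int)
    (h : l.Pairwise (· < ·)) : (pvInsertUnique t l).Pairwise (· < ·) := by
  induction l with
  | nil => simp [pvInsertUnique]
  | cons y ys ih =>
    rcases List.pairwise_cons.mp h with ⟨hy, hys⟩
    simp only [pvInsertUnique]
    split_ifs with h1 h2
    · refine List.pairwise_cons.mpr ⟨?_, ih hys⟩
      intro x hx
      rcases (pvInsertUnique_mem t x ys).mp hx with rfl | hx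
      · exact h1
      · exact hy x hx
    · subst h2; exact h
    · refine List.pairwise_cons.mpr ⟨?_, h⟩
      intro x hx
      have hty : t < y := lt_of_le_of_ne (not_lt.mp h1) (fun hc => h2 hc.symm)
      rcases List.mem_cons.mp hx with rfl | hx
      · exact hty
      · exact lt_trans hty (hy x hx)

-- the foldl of pvInsertUnique: membership and sortedness invariant
theorem pvFold_invariant (ys : List Int) (acc : List Int)
    (hp : acc.Pairwise (· < ·)) :
    (ys.foldl (fun r t => pvInsertUnique t r) acc).Pairwise (· < ·) ∧
    (∀ x, x ∈ ys.foldl (fun r t => pvInsertUnique t r) acc ↔ x ∈ ys ∨ x ∈ acc) := by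
  induction ys generalizing acc with
  | nil => simpa using hp
  | cons t ts ih =>
    rcases ih (pvInsertUnique t acc) (pvInsertUnique_pairwise t acc hp) with ⟨h1, h2⟩
    refine ⟨h1, fun x => ?_⟩
    rw [List.foldl_cons] at *
    rw [h2 x, pvInsertUnique_mem, List.mem_cons]
    tauto

theorem reindexed_objective_editing_levels_py_spec : Claim_equal_reindexed_objective_editing_levels_py := by
  unfold Claim_equal_reindexed_objective_editing_levels_py
  intro depths dl _
  unfold Spec_reindexed_objective_editing_levels_py
  unfold reindexed_objective_editing_levels_py reindexed_objective_editing_levels_py_alt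
  simp only []
  set f : Int → Int := fun d => if d > dl then d - 1 else d with hf
  set ys := depths.map f with hys
  rw [pvFoldl_add_eq_ofList depths f]
  have hfold : depths.foldl (fun result depth => pvInsertUnique (f depth) result) []
      = ys.foldl (fun r t => pvInsertUnique t r) [] := by
    rw [hys, List.foldl_map]
  rw [hfold]
  set la := PySem.List.sorted (PySem.Set.ofList ys) (fun x => x) false with hla
  set lb := ys.foldl (fun r t => pvInsertUnique t r) [] with hlb
  rcases pvFold_invariant ys [] (by simp) with ⟨hpb, hmb'⟩
  have hpa : la.Pairwise (· < ·) := PySem.List.sorted_ofList_pairwise_lt ys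
  have hma : ∀ x, x ∈ la ↔ x ∈ ys := by
    intro x
    rw [hla, PySem.List.mem_sorted, PySem.Set.mem_ofList]
  have hmb : ∀ x, x ∈ lb ↔ x ∈ ys := by
    intro x; rw [← hlb] at hmb'; simpa using hmb' x
  have hna : la.Nodup := hpa.imp (fun h => ne_of_lt h)
  have hnb : lb.Nodup := hpb.imp (fun h => ne_of_lt h)
  have hperm : la.Perm lb := by
    rw [List.perm_ext_iff_of_nodup hna hnb]
    intro x; rw [hma x, hmb x]
  exact PySem.List.eq_of_perm_of_pairwise_le_of_injective (fun x => x)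
    (fun a b h => h) hperm (hpa.imp le_of_lt) (hpb.imp le_of_lt)
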